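-- pv_equiv track=rewrite | github.com/pibara/coinzdense-python | yamltest.py | _params_to_index_space
-- ===== SOURCE A (Python) =====
-- def _params_to_chunk_count(hashlen, otsbits):
--     """Calculate how many one-time signature chunks are needed for a whole one-time signature"""
--     return (hashlen * 8 + otsbits -1) // otsbits
--
-- def _params_to_per_signature_index_space(hashlen, otsbits):
--     """Calculate how much WEN3 enropy key space is needed for a single signature"""
--     # Twice the number of one-time signature chunks plus a transaction salt plus misc entropy with diverse uses.
--     return _params_to_chunk_count(hashlen, otsbits) *2 + 2
--
-- def _params_to_index_space(hashlen, otsbits, heights):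
--     """Calculate how much WEN3 entropy key space is needed for a whole multi-level signing key"""
--     # The WEN3 entropy key space needed for the currently lowest level of the multi-level signing key.
--     #  This is the max number of signatures times the amount of WEN3 entopy key space for a single signature.
--     lowest_level_signing_space = (1 << sum(heights)) * _params_to_per_signature_index_space(hashlen, otsbits)
--     if len(heights) > 1:
--         # If _params_to_index_space was invoked at a non-root level-key level, we calculate how many level-key
--         #  salts we need at the lowest level.
--         lowest_level_level_key_salts = 1 << sum(heights[:-1])
--         # The return value is the WEN3 entropy kay-space for the lowest level level-keys plus the result of invoking
--         #  _params_to_index_space for all the higer level level-keys.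
--         return lowest_level_signing_space + \
--                 lowest_level_level_key_salts + \
--                 _params_to_index_space(hashlen, otsbits, heights[:-1])
--     # If _params_to_index_space was invoked on the root level layer key of the signing key, return one (level salt)
--     #  plus the amount needed for signatures at the root leval.
--     return lowest_level_signing_space + 1
-- ===== SOURCE B (Python) =====
-- def _params_to_index_space(hashlen, otsbits, heights):
--     """Iterative one-pass version: walk heights once with a running prefix sum."""
--     per = ((hashlen * 8 + otsbits - 1) // otsbits) * 2 + 2
--     if not heights:
--         return per + 1
--     total = 1
--     prefix = 0
--     for i, h in enumerate(heights):
--         if i > 0: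
--             total += 1 << prefix
--         prefix += h
--         total += per * (1 << prefix)
--     return total
-- ===== Notes on version B (the rewrite author's own statement) =====
-- stated objective: simpler
-- what changed: Replaced the right-recursion over heights[:-1] slices (which re-sums each prefix from scratch) by a single left-to-right loop maintaining a running prefix sum and an accumulator.
import Mathlib
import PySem

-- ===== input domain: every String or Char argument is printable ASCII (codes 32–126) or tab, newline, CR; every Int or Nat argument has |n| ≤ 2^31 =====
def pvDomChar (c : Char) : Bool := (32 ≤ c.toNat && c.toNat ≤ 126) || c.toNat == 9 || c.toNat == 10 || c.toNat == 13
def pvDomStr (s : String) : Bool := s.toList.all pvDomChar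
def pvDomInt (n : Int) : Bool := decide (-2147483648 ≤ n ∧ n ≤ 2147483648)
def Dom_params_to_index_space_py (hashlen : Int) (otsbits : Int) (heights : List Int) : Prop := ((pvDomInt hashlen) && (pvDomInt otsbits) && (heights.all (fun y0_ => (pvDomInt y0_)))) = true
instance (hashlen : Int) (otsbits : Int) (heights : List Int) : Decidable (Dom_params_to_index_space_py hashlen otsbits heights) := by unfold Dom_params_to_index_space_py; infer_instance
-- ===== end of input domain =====

-- B rewrites A's right-recursion over heights[:-1] slices as one left-to-right pass with a
-- running prefix-sum; equivalence is proved on all inputs where the Python A returns (Pre_).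

-- ===== PORT A =====
-- _params_to_chunk_count: (hashlen * 8 + otsbits - 1) // otsbits  (Python floor division)
def chunk_count_py (hashlen : Int) (otsbits : Int) : Int :=
  PySem.Int.floordiv (hashlen * 8 + otsbits - 1) otsbits

-- _params_to_per_signature_index_space
def per_signature_py (hashlen : Int) (otsbits : Int) : Int :=
  chunk_count_py hashlen otsbits * 2 + 2

-- '1 << s' ported as 2 ^ s.toNat: exact for s ≥ 0, which Pre_ guarantees for every shift used.
def params_to_index_space_py (hashlen : Int) (otsbits : Int) (heights : List Int) : Int :=
  let lowest_level_signing_space :=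
    2 ^ heights.sum.toNat * per_signature_py hashlen otsbits
  if heights.length > 1 then
    lowest_level_signing_space + 2 ^ heights.dropLast.sum.toNat +
      params_to_index_space_py hashlen otsbits heights.dropLast
  else
    lowest_level_signing_space + 1
termination_by heights.length
decreasing_by
  simp [List.length_dropLast]; omega

-- ===== PORT B =====
def params_to_index_space_py_alt (hashlen : Int) (otsbits : Int) (heights : List Int) : Int :=
  let per := PySem.Int.floordiv (hashlen * 8 + otsbits - 1) otsbits * 2 + 2
  match heights with
  | [] => per + 1
  | _ :: _ =>
    ((PySem.List.enumerate heights 0).foldl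
      (fun (st : Int × Int) p =>
        let total := if p.1 > 0 then st.1 + 2 ^ st.2.toNat else st.1
        let pfx := st.2 + p.2
        (total + per * 2 ^ pfx.toNat, pfx))
      ((1 : Int), (0 : Int))).1

-- ===== PRECONDITION & SPEC =====
-- Pre_ = exactly where Python A returns: otsbits ≠ 0 (else ZeroDivisionError) and every
-- nonempty prefix sum of heights is ≥ 0 (else '1 << negative' raises ValueError).
def Pre_params_to_index_space_py (hashlen : Int) (otsbits : Int) (heights : List Int) : Prop :=
  otsbits ≠ 0 ∧ ∀ k ∈ List.range heights.length, 0 ≤ (heights.take (k + 1)).sum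
instance (hashlen : Int) (otsbits : Int) (heights : List Int) : Decidable (Pre_params_to_index_space_py hashlen otsbits heights) := by unfold Pre_params_to_index_space_py; infer_instance

def pvWitness_params_to_index_space_py : Int × Int × List Int := (32, 4, [3, 2])

def Spec_params_to_index_space_py (hashlen : Int) (otsbits : Int) (heights : List Int) (out : Int) : Prop := out = params_to_index_space_py_alt hashlen otsbits heights
instance (hashlen : Int) (otsbits : Int) (heights : List Int) (out : Int) : Decidable (Spec_params_to_index_space_py hashlen otsbits heights out) := by unfold Spec_params_to_index_space_py; infer_instance

-- ===== CLAIM (what is proved, stated in full; the proofs are below) =====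
def Claim_equal_params_to_index_space_py : Prop := ∀ (hashlen : Int) (otsbits : Int) (heights : List Int), Dom_params_to_index_space_py hashlen otsbits heights → Pre_params_to_index_space_py hashlen otsbits heights → Spec_params_to_index_space_py hashlen otsbits heights (params_to_index_space_py hashlen otsbits heights)

-- ===== LEMMAS AND PROOFS =====

-- B's loop step, named for the proofs.
def pvStep (per : Int) (st : Int × Int) (p : Int × Int) : Int × Int :=
  let total := if p.1 > 0 then st.1 + 2 ^ st.2.toNat else st.1
  let pfx := st.2 + p.2
  (total + per * 2 ^ pfx.toNat, pfx)

-- A unfolded one step on a nonempty list extended on the right.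
theorem pvA_concat (hashlen otsbits : Int) (hs : List Int) (x : Int) (hne : hs ≠ []) :
    params_to_index_space_py hashlen otsbits (hs ++ [x]) =
      2 ^ (hs ++ [x]).sum.toNat * per_signature_py hashlen otsbits + 2 ^ hs.sum.toNat +
        params_to_index_space_py hashlen otsbits hs := by
  rw [params_to_index_space_py]
  simp
  intro h
  exact absurd h hne

-- Loop invariant: after processing a nonempty hs, the state is (A hs, hs.sum).
theorem pv_loop_inv (hashlen otsbits : Int) (hs : List Int) (hne : hs ≠ []) :
    (PySem.List.enumerate hs 0).foldl (pvStep (per_signature_py hashlen otsbits)) (1, 0)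
      = (params_to_index_space_py hashlen otsbits hs, hs.sum) := by
  induction hs using List.reverseRecOn with
  | nil => simp at hne
  | append_singleton hs x ih =>
    rcases List.eq_nil_or_concat hs with h0 | _
    · subst h0
      simp [PySem.List.enumerate, pvStep, params_to_index_space_py, per_signature_py]
      ring
    · have hne' : hs ≠ [] := by rintro rfl; simp_all
      have hlen : 0 < hs.length := by cases hs with
        | nil => exact absurd rfl hne'
        | cons a t => simp
      rw [PySem.List.enumerate_append, List.foldl_append, ih hne',
        pvA_concat hashlen otsbits hs x hne']
      simp [PySem.List.enumerate, pvStep, hlen]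
      ring

theorem params_to_index_space_py_eq_alt (hashlen otsbits : Int) (heights : List Int) :
    params_to_index_space_py hashlen otsbits heights
      = params_to_index_space_py_alt hashlen otsbits heights := by
  cases heights with
  | nil =>
    simp [params_to_index_space_py, params_to_index_space_py_alt, per_signature_py, chunk_count_py]
  | cons a t =>
    have h := pv_loop_inv hashlen otsbits (a :: t) (by simp)
    simp only [params_to_index_space_py_alt, per_signature_py, chunk_count_py] at *
    rw [show (fun (st : Int × Int) p =>
        (((if p.1 > 0 then st.1 + 2 ^ st.2.toNat else st.1) +
          (PySem.Int.floordiv (hashlen * 8 + otsbits - 1) otsbits * 2 + 2) * 2 ^ (st.2 + p.2).toNat,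
          st.2 + p.2) : Int × Int)) =
        pvStep (PySem.Int.floordiv (hashlen * 8 + otsbits - 1) otsbits * 2 + 2) from rfl]
    rw [h]

-- ===== VERDICT (by name: the statement is the Claim_ definition above) =====
theorem params_to_index_space_py_spec : Claim_equal_params_to_index_space_py := by
  intro hashlen otsbits heights _ _
  unfold Spec_params_to_index_space_py
  exact params_to_index_space_py_eq_alt hashlen otsbits heights
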